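-- pv_equiv track=rewrite | github.com/ozkayas/leetcode_solutions | 9999-A2Z-OA/Find Min Trips.py | findMinTrips
-- ===== SOURCE A (Python) =====
-- from collections import defaultdict
-- from typing import List
--
-- def findMinTrips(pW: List[int]) -> int:
--     trips = 0
--     freq = defaultdict(int)
--     for num in pW:
--         freq[num] += 1
--
--     for num, count in freq.items():
--         while count > 0:
--             if count >= 3:
--                 trips += 1
--                 count -= 3
--             elif count == 2:
--                 trips += 1
--                 count -= 2
--             else:
--                 return -1
--
--     return trips
-- ===== SOURCE B (Python) =====
-- def findMinTrips(pW):
--     freq = {}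
--     for num in pW:
--         freq[num] = freq.get(num, 0) + 1
--     trips = 0
--     for count in freq.values():
--         q, r = divmod(count, 3)
--         if r == 1:
--             return -1
--         trips += q + (1 if r == 2 else 0)
--     return trips
-- ===== Notes on version B (the rewrite author's own statement) =====
-- stated objective: simpler
-- what changed: Replaces A's inner while-loop that repeatedly subtracts 3 (then 2) from each frequency with a single closed-form divmod step per distinct value (trips += count//3 plus one if count%3==2, -1 immediately if count%3==1), so each distinct value costs O(1) instead of O(count).
import Mathlib
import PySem

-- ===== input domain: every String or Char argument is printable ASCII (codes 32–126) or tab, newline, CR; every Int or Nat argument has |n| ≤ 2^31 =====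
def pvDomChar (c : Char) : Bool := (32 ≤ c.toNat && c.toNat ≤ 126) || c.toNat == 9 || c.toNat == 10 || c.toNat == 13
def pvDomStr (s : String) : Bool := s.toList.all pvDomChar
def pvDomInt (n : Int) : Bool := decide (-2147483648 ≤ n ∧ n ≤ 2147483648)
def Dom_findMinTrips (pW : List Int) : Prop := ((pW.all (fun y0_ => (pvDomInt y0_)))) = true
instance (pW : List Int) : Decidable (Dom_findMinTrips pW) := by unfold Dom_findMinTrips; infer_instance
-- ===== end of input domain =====

-- B replaces A's inner while-loop (greedy subtraction of 3 then 2 per distinct value)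
-- by a closed-form divmod step per distinct value; same return value everywhere (objective: simpler).

-- ===== PORT A =====
-- the 'while count > 0' loop of A; 'none' = the Python 'return -1' path
def pvAWhile (count trips : Int) : Option Int :=
  if 0 < count then
    if 3 ≤ count then pvAWhile (count - 3) (trips + 1)
    else if count = 2 then pvAWhile (count - 2) (trips + 1)
    else none
  else some trips
termination_by count.toNat
decreasing_by all_goals omega

-- the 'for num, count in freq.items()' loop of A
def pvALoop : List (Int × Int) → Int → Int
  | [], trips => trips
  | (_, count) :: rest, trips =>
    match pvAWhile count trips with
    | none => -1
    | some t => pvALoop rest t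

def findMinTrips (pW : List Int) : Int :=
  let freq : PySem.Dict Int Int := pW.foldl (fun d num => d.modify num 0 (· + 1)) PySem.Dict.empty
  pvALoop freq.items 0

-- ===== PORT B =====
-- the 'for count in freq.values()' loop of B: one divmod per distinct value
def pvBLoop : List Int → Int → Int
  | [], trips => trips
  | count :: rest, trips =>
    let q := PySem.Int.floordiv count 3
    let r := PySem.Int.mod count 3
    if r = 1 then -1
    else pvBLoop rest (trips + q + (if r = 2 then 1 else 0))

def findMinTrips_alt (pW : List Int) : Int :=
  let freq : PySem.Dict Int Int := pW.foldl (fun d num => d.insert num (d.getD num 0 + 1)) PySem.Dict.empty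
  pvBLoop freq.values 0

-- ===== PRECONDITION & SPEC =====
def Spec_findMinTrips (pW : List Int) (out : Int) : Prop := out = findMinTrips_alt pW
instance (pW : List Int) (out : Int) : Decidable (Spec_findMinTrips pW out) := by unfold Spec_findMinTrips; infer_instance

-- ===== CLAIM (what is proved, stated in full; the proofs are below) =====
def Claim_equal_findMinTrips : Prop := ∀ (pW : List Int), Dom_findMinTrips pW → Spec_findMinTrips pW (findMinTrips pW)

-- ===== LEMMAS AND PROOFS =====

-- A's while-loop in closed form (for the nonnegative counts a frequency map holds)
theorem pvAWhile_closed (count trips : Int) (h : 0 ≤ count) :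
    pvAWhile count trips =
      if count % 3 = 1 then none
      else some (trips + count / 3 + (if count % 3 = 2 then 1 else 0)) := by
  induction count, trips using pvAWhile.induct with
  | case1 count trips hpos h3 ih =>
    rw [pvAWhile, if_pos hpos, if_pos h3, ih (by omega)]
    have h1 : (count - 3) % 3 = count % 3 := by omega
    have h2 : (count - 3) / 3 = count / 3 - 1 := by omega
    rw [h1, h2]
    split_ifs <;> simp
  | case2 trips hpos h3 ih =>
    rw [pvAWhile]; norm_num; rw [pvAWhile]; norm_num
  | case3 count trips hpos h3 h2 =>
    rw [pvAWhile, if_pos hpos, if_neg h3, if_neg h2]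
    have : count = 1 := by omega
    subst this; norm_num
  | case4 count trips hpos =>
    rw [pvAWhile, if_neg hpos]
    have : count = 0 := by omega
    subst this; norm_num

-- item-by-item: A's outer loop equals B's loop over the second components
theorem pvLoop_eq (items : List (Int × Int)) (trips : Int)
    (h : ∀ p ∈ items, 0 ≤ p.2) :
    pvALoop items trips = pvBLoop (items.map (·.2)) trips := by
  induction items generalizing trips with
  | nil => rfl
  | cons p rest ih =>
    obtain ⟨num, count⟩ := p
    have hc : 0 ≤ count := h _ (List.mem_cons_self)
    simp only [pvALoop, List.map_cons, pvBLoop]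
    rw [pvAWhile_closed count trips hc,
        PySem.Int.mod_eq_emod_of_pos (by norm_num : (0:Int) < 3),
        PySem.Int.floordiv_eq_ediv_of_pos (by norm_num : (0:Int) < 3)]
    split_ifs with h1
    · rfl
    all_goals exact ih _ (fun p hp => h p (List.mem_cons_of_mem _ hp))

-- ===== VERDICT (by name: the statement is the Claim_ definition above) =====
theorem findMinTrips_spec : Claim_equal_findMinTrips := by
  intro pW _
  show findMinTrips pW = findMinTrips_alt pW
  unfold findMinTrips findMinTrips_alt
  rw [PySem.Dict.foldl_insert_getD_add_one_eq_counter, ← PySem.Dict.counter_eq_foldl]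
  show pvALoop (PySem.Dict.counter pW).items 0
      = pvBLoop ((PySem.Dict.counter pW : PySem.Dict Int Int).items.map (·.2)) 0
  apply pvLoop_eq
  intro p hp
  rw [PySem.Dict.items_counter] at hp
  obtain ⟨k, _, rfl⟩ := List.mem_map.mp hp
  positivity
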